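-- pv_equiv track=rewrite | github.com/jjm6604/problem | 프로그래머스/2/87390. n＾2 배열 자르기/n＾2 배열 자르기.py | solution
-- ===== SOURCE A (Python) =====
-- def solution(n, left, right):
--     answer = []
--     # 1234 2234 3334 4444
--     N = left // n + 1
--     M = right // n + 2
--
--     start = left % n
--     end = right % n
--
--     numbers = []
--
--     for i in range(n):
--         numbers.append(i+1)
--
--     for i in range(N, M):
--         row = [i] * i + numbers[i:]
--         answer += row
--
--     length = len(answer)
--     answer = answer[start: length - n + end + 1]
--
--
--     return answer
-- ===== SOURCE B (Python) =====
-- def solution(n, left, right):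
--     # Each flat index idx of the n x n grid holds max(row, col) + 1,
--     # where row = idx // n and col = idx % n.  Compute the slice directly.
--     answer = []
--     for idx in range(left, right + 1):
--         answer.append(max(idx // n, idx % n) + 1)
--     return answer
-- ===== Notes on version B (the rewrite author's own statement) =====
-- stated objective: faster
-- what changed: B drops A's numbers list, row materialization (rows N..M built as [i]*i + numbers[i:]) and the final slice, computing each output element directly as max(idx//n, idx%n)+1 for idx in range(left, right+1): O(right-left) instead of O(n + right - left).
-- outside the precondition, e.g. on solution(-2, 0, 1): A returns [], B returns [1, 0]; on solution(3, -1, 2): A returns [3, 1, 2, 3], B returns [3, 1, 2, 3]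
import Mathlib
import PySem

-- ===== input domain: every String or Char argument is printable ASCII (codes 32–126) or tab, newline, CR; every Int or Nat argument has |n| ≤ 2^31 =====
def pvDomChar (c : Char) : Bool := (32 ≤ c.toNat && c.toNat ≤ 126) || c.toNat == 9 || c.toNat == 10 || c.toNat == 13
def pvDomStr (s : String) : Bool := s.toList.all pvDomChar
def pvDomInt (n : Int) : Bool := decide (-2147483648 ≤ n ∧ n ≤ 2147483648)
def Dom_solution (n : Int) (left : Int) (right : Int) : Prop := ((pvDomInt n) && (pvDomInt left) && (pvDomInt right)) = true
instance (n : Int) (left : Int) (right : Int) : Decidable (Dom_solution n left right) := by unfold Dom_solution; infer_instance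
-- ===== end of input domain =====

-- B computes each output element directly by the closed-form coordinate formula
-- max(idx // n, idx % n) + 1 instead of materializing rows N..M and slicing their concatenation.


-- ===== PORT A =====
def solution (n : Int) (left : Int) (right : Int) : List Int :=
  let N := PySem.Int.floordiv left n + 1
  let M := PySem.Int.floordiv right n + 2
  let start := PySem.Int.mod left n
  let stop := PySem.Int.mod right n
  let numbers := (PySem.List.pyRange 0 n 1).foldl (fun acc i => acc ++ [i + 1]) []
  let answer := (PySem.List.pyRange N M 1).foldl
    (fun acc i => acc ++ (PySem.List.pyRepeat [i] i ++ PySem.List.slice numbers (some i) none)) []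
  let length : Int := answer.length
  PySem.List.slice answer (some start) (some (length - n + stop + 1))

-- ===== PORT B =====
def solution_alt (n : Int) (left : Int) (right : Int) : List Int :=
  (PySem.List.pyRange left (right + 1) 1).foldl
    (fun acc idx => acc ++ [max (PySem.Int.floordiv idx n) (PySem.Int.mod idx n) + 1]) []

-- ===== PRECONDITION & SPEC =====
-- Pre_ excludes n ≤ 0 (A raises ZeroDivisionError at n = 0, and for n < 0 builds rows from an
-- empty numbers list), left < 0 (A then slices numbers with a negative index, a wraparound
-- accident) and right ≥ n*n (rows past row n are overrun artifacts [i]*i of the wrong length):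
-- outside the n×n grid A's value is an accident of its row/slice mechanics that no caller
-- would specify.  The second disjunct (right's row before left's row, where A keeps no rows
-- and both return []) is kept inside Pre_ regardless of the grid bounds.
def Pre_solution (n : Int) (left : Int) (right : Int) : Prop :=
  1 ≤ n ∧ ((0 ≤ left ∧ right < n * n) ∨ PySem.Int.floordiv right n < PySem.Int.floordiv left n)
instance (n : Int) (left : Int) (right : Int) : Decidable (Pre_solution n left right) := by
  unfold Pre_solution; infer_instance
def pvWitness_solution : Int × Int × Int := (3, 2, 5)

def Spec_solution (n : Int) (left : Int) (right : Int) (out : List Int) : Prop := out = solution_alt n left right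
instance (n : Int) (left : Int) (right : Int) (out : List Int) : Decidable (Spec_solution n left right out) := by unfold Spec_solution; infer_instance

-- ===== CLAIM (what is proved, stated in full; the proofs are below) =====
def Claim_equal_solution : Prop := ∀ (n : Int) (left : Int) (right : Int), Dom_solution n left right → Pre_solution n left right → Spec_solution n left right (solution n left right)

-- ===== LEMMAS AND PROOFS =====

-- the flat-index value function B uses
def pvF (n idx : Int) : Int := max (PySem.Int.floordiv idx n) (PySem.Int.mod idx n) + 1

-- pvF at flat index i*n + k (row i, column k)
theorem pvF_eval (n i k : Int) (hn : 1 ≤ n) (hk0 : 0 ≤ k) (hkn : k < n) :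
    pvF n (i * n + k) = max i k + 1 := by
  have hdiv : PySem.Int.floordiv (i * n + k) n = i := by
    rw [PySem.Int.floordiv_eq_iff_of_pos (show (0:Int) < n by omega)]
    have : (i + 1) * n = i * n + n := by ring
    constructor
    · linarith
    · linarith
  have hmod : PySem.Int.mod (i * n + k) n = k := by
    have := PySem.Int.floordiv_mul_add_mod (i * n + k) n
    rw [hdiv] at this; linarith
  simp [pvF, hdiv, hmod]

-- A's numbers list is [1, ..., n]
theorem numbers_eq (n : Int) :
    (PySem.List.pyRange 0 n 1).foldl (fun acc i => acc ++ [i + 1]) []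
    = PySem.List.pyRange 1 (n + 1) 1 := by
  rw [PySem.List.foldl_append_singleton_eq_map, List.nil_append]
  rw [PySem.List.pyRange_one 0 n, PySem.List.pyRange_one 1 (n + 1), List.map_map]
  have h : n + 1 - 1 = n - 0 := by ring
  rw [h]
  apply List.map_congr_left
  intro k _
  simp; ring

-- A's row i (1 ≤ i ≤ n): [i]*i + numbers[i:] = pvF over flat indices (i-1)*n .. i*n
theorem row_eq (n i : Int) (hn : 1 ≤ n) (h1 : 1 ≤ i) (h2 : i ≤ n) :
    List.replicate i.toNat i ++ (PySem.List.pyRange 1 (n + 1) 1).drop i.toNat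
    = (PySem.List.pyRange ((i - 1) * n) (i * n) 1).map (pvF n) := by
  have hsub : i * n - (i - 1) * n = n := by ring
  apply List.ext_getElem
  · simp [PySem.List.length_pyRange_one, hsub]; omega
  · intro k hk1 hk2
    have hkn : k < n.toNat := by
      rw [List.length_map, PySem.List.length_pyRange_one, hsub] at hk2; omega
    have hrhs : ((PySem.List.pyRange ((i - 1) * n) (i * n) 1).map (pvF n))[k] =
        max (i - 1) (k : Int) + 1 := by
      rw [List.getElem_map, PySem.List.getElem_pyRange_one]
      exact pvF_eval n (i - 1) k hn (by omega) (by omega)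
    rw [hrhs]
    by_cases hki : k < i.toNat
    · rw [List.getElem_append_left (by simpa using hki)]
      rw [List.getElem_replicate]
      omega
    · rw [List.getElem_append_right (by simpa using hki)]
      simp only [List.length_replicate, List.getElem_drop, PySem.List.getElem_pyRange_one]
      omega

-- A's row loop concatenates to pvF over the corresponding flat indices
theorem concat_eq (n : Int) (hn : 1 ≤ n) :
    ∀ (d : Nat) (a b : Int) (init : List Int), (b - a).toNat = d → 1 ≤ a → b ≤ n + 1 →
    (PySem.List.pyRange a b 1).foldl
      (fun acc i => acc ++ (PySem.List.pyRepeat [i] i ++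
        PySem.List.slice (PySem.List.pyRange 1 (n + 1) 1) (some i) none)) init
    = init ++ (PySem.List.pyRange ((a - 1) * n) ((b - 1) * n) 1).map (pvF n) := by
  intro d
  induction d with
  | zero =>
    intro a b init hd ha hb
    have hba : b ≤ a := by omega
    have h2 : (b - 1) * n ≤ (a - 1) * n := by nlinarith
    rw [PySem.List.pyRange_one_eq_nil hba, PySem.List.pyRange_one_eq_nil h2]
    simp
  | succ d ih =>
    intro a b init hd ha hb
    have hab : a < b := by omega
    rw [PySem.List.pyRange_one_cons hab]
    simp only [List.foldl_cons]
    rw [ih (a + 1) b _ (by omega) (by omega) hb]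
    rw [PySem.List.slice_from _ (by omega), PySem.List.pyRepeat_singleton]
    rw [row_eq n a hn ha (by omega)]
    have h3 : (a + 1 - 1) * n = a * n := by ring
    have hsplit : PySem.List.pyRange ((a - 1) * n) ((b - 1) * n) 1 =
        PySem.List.pyRange ((a - 1) * n) (a * n) 1 ++
        PySem.List.pyRange ((a + 1 - 1) * n) ((b - 1) * n) 1 := by
      rw [h3]
      exact PySem.List.pyRange_one_append _ _ _ (by nlinarith) (by nlinarith)
    rw [hsplit, List.map_append, List.append_assoc]

-- slicing a mapped range shifts the range
theorem slice_map_pyRange (f : Int → Int) (a b s t : Int)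
    (hs : 0 ≤ s) (hst : s ≤ t) (htb : a + t ≤ b) :
    PySem.List.slice ((PySem.List.pyRange a b 1).map f) (some s) (some t)
    = (PySem.List.pyRange (a + s) (a + t) 1).map f := by
  rw [PySem.List.slice_toNat _ hs (by omega)]
  rw [PySem.List.pyRange_one_append a (a + s) b (by omega) (by omega), List.map_append]
  rw [List.drop_append_of_le_length (by simp only [List.length_map, PySem.List.length_pyRange_one]; omega)]
  rw [List.drop_of_length_le (by simp only [List.length_map, PySem.List.length_pyRange_one]; omega)]
  rw [PySem.List.pyRange_one_append (a + s) (a + t) b (by omega) (by omega), List.map_append,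
    List.nil_append]
  rw [List.take_append_of_le_length (by simp only [List.length_map, PySem.List.length_pyRange_one]; omega)]
  rw [List.take_of_length_le (by simp only [List.length_map, PySem.List.length_pyRange_one]; omega)]

-- ===== VERDICT (by name: the statement is the Claim_ definition above) =====
theorem solution_spec : Claim_equal_solution := by
  intro n left right _ hpre
  obtain ⟨hn, hpre⟩ := hpre
  have hpos : (0:Int) < n := by omega
  have hq := PySem.Int.floordiv_mul_add_mod left n
  have hr0 := PySem.Int.mod_nonneg left hpos
  have hr1 := PySem.Int.mod_lt left hpos
  have hq' := PySem.Int.floordiv_mul_add_mod right n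
  have hr0' := PySem.Int.mod_nonneg right hpos
  have hr1' := PySem.Int.mod_lt right hpos
  unfold Spec_solution solution solution_alt
  rw [numbers_eq n]
  dsimp only
  by_cases hqq : PySem.Int.floordiv left n ≤ PySem.Int.floordiv right n
  · -- left's row is not after right's row: the row loop materializes rows, the slice selects
    obtain ⟨hl0, hrn⟩ : 0 ≤ left ∧ right < n * n := by
      rcases hpre with h | h
      · exact h
      · omega
    have hq0 : 0 ≤ PySem.Int.floordiv left n := by nlinarith
    have hqn : PySem.Int.floordiv right n ≤ n - 1 := by nlinarith
    rw [concat_eq n hn ((PySem.Int.floordiv right n + 2) - (PySem.Int.floordiv left n + 1)).toNat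
        _ _ [] rfl (by omega) (by omega)]
    rw [List.nil_append]
    have hAB : (PySem.Int.floordiv left n + 1 - 1) * n = PySem.Int.floordiv left n * n := by ring
    have hBB : (PySem.Int.floordiv right n + 2 - 1) * n
        = (PySem.Int.floordiv right n + 1) * n := by ring
    rw [hAB, hBB]
    have hlen : ((List.map (pvF n) (PySem.List.pyRange (PySem.Int.floordiv left n * n)
        ((PySem.Int.floordiv right n + 1) * n) 1)).length : Int)
        = (PySem.Int.floordiv right n + 1) * n - PySem.Int.floordiv left n * n := by
      rw [List.length_map, PySem.List.length_pyRange_one]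
      rw [Int.toNat_of_nonneg (by nlinarith)]
    rw [hlen]
    by_cases hlr : left ≤ right
    · rw [slice_map_pyRange (pvF n) _ _ _ _ hr0 (by nlinarith) (by nlinarith)]
      have e1 : PySem.Int.floordiv left n * n + PySem.Int.mod left n = left := hq
      have e2 : PySem.Int.floordiv left n * n + ((PySem.Int.floordiv right n + 1) * n -
          PySem.Int.floordiv left n * n - n + PySem.Int.mod right n + 1) = right + 1 := by nlinarith
      rw [e1, e2]
      rw [PySem.List.foldl_append_singleton_eq_map
          (fun idx => max (PySem.Int.floordiv idx n) (PySem.Int.mod idx n) + 1), List.nil_append]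
      rfl
    · -- left > right within the slice window: both sides are empty
      rw [PySem.List.slice_toNat _ hr0 (by nlinarith)]
      have ht : ((PySem.Int.floordiv right n + 1) * n - PySem.Int.floordiv left n * n - n +
          PySem.Int.mod right n + 1).toNat - (PySem.Int.mod left n).toNat = 0 := by
        have : (PySem.Int.floordiv right n + 1) * n - PySem.Int.floordiv left n * n - n +
            PySem.Int.mod right n + 1 ≤ PySem.Int.mod left n := by nlinarith
        omega
      rw [ht, List.take_zero]
      rw [PySem.List.pyRange_one_eq_nil (by omega)]
      rfl
  · -- right's row precedes left's row: A keeps no rows, B's range is empty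
    rw [PySem.List.pyRange_one_eq_nil
        (show PySem.Int.floordiv right n + 2 ≤ PySem.Int.floordiv left n + 1 by omega)]
    rw [PySem.List.pyRange_one_eq_nil (show right + 1 ≤ left by nlinarith)]
    simp [PySem.List.slice]
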